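-- pv_equiv track=rewrite | github.com/faterazer/LeetCode | 2024. Maximize the Confusion of an Exam/Solution.py | maxConsecutiveAnswers_MK2
-- ===== SOURCE A (Python) =====
-- def maxConsecutiveAnswers_MK2(answerKey: str, k: int) -> int:
--     t_cnt = f_cnt = res = 0
--     for i in range(len(answerKey)):
--         if answerKey[i] == 'T':
--             t_cnt += 1
--         else:
--             f_cnt += 1
--         if min(t_cnt, f_cnt) <= k:
--             res += 1
--         elif answerKey[i - res] == 'T':
--             t_cnt -= 1
--         else:
--             f_cnt -= 1
--     return res
-- ===== SOURCE B (Python) =====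
-- def maxConsecutiveAnswers_MK2(answerKey: str, k: int) -> int:
--     # Two independent sliding-window passes (one per answer kind), each with an
--     # explicit left pointer that contracts while the window holds more than k
--     # minority characters; the answer is the larger of the two window maxima.
--     def longest(pred):
--         cnt = 0   # occurrences of the minority kind inside the window
--         lo = 0    # left edge of the window
--         best = 0
--         for r, x in enumerate(answerKey):
--             if pred(x):
--                 cnt += 1
--             while cnt > k and lo <= r:
--                 if pred(answerKey[lo]):
--                     cnt -= 1
--                 lo += 1
--             if r - lo + 1 > best:
--                 best = r - lo + 1
--         return best
--
--     return max(longest(lambda c: c == 'T'), longest(lambda c: c != 'T'))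
-- ===== Notes on version B (the rewrite author's own statement) =====
-- stated objective: alternative
-- what changed: A's single fused pass with a never-shrinking window and mixed T/F counters is replaced by two independent standard sliding-window passes (one per answer kind), each keeping one counter and an explicit left pointer with an inner contracting while-loop, combined with max.
import Mathlib
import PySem

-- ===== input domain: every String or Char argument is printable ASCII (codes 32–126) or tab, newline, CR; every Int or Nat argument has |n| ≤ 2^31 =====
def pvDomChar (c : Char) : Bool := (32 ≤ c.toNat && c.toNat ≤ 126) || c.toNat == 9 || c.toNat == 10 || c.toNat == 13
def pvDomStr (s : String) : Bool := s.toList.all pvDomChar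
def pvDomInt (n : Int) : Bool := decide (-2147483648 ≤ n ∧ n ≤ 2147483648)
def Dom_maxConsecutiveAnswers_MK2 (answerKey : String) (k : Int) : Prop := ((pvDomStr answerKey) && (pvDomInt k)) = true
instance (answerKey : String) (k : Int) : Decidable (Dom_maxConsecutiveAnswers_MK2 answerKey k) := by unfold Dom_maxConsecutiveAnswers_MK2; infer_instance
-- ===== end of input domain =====

-- B replaces A's single fused never-shrinking window with two independent contracting
-- sliding-window passes (one per answer kind) and returns the larger maximum; same O(n) cost.

-- ===== PORT A =====
-- loop body of A's single for-loop (state = (t_cnt, f_cnt, res))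
def pvStepA (l : List Char) (k : Int) (st : Int × Int × Int) (i : Int) : Int × Int × Int :=
  let c := (PySem.List.pyGet? l i).getD ' '   -- i is always in range, so Python never raises here
  let t := if c == 'T' then st.1 + 1 else st.1
  let f := if c == 'T' then st.2.1 else st.2.1 + 1
  if min t f ≤ k then (t, f, st.2.2 + 1)
  else
    let c2 := (PySem.List.pyGet? l (i - st.2.2)).getD ' '   -- 0 ≤ i - res ≤ i, in range
    if c2 == 'T' then (t - 1, f, st.2.2) else (t, f - 1, st.2.2)

def maxConsecutiveAnswers_MK2 (answerKey : String) (k : Int) : Int :=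
  ((PySem.List.pyRange 0 (PySem.Str.len answerKey) 1).foldl
    (pvStepA answerKey.toList k) (0, 0, 0)).2.2

-- ===== PORT B =====
-- the inner `while cnt > k and lo <= r` contraction loop of B's helper
def pvShrink (l : List Char) (k : Int) (pred : Char → Bool) (r cnt lo : Int) : Int × Int :=
  if h : k < cnt ∧ lo ≤ r then
    pvShrink l k pred r
      (if pred ((PySem.List.pyGet? l lo).getD ' ') then cnt - 1 else cnt) (lo + 1)
  else (cnt, lo)
termination_by (r + 1 - lo).toNat
decreasing_by omega

-- loop body of B's helper (state = (cnt, lo, best))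
def pvStepB (l : List Char) (k : Int) (pred : Char → Bool)
    (st : Int × Int × Int) (rx : Int × Char) : Int × Int × Int :=
  let cnt := if pred rx.2 then st.1 + 1 else st.1
  let s2 := pvShrink l k pred rx.1 cnt st.2.1
  let best := if st.2.2 < rx.1 - s2.2 + 1 then rx.1 - s2.2 + 1 else st.2.2
  (s2.1, s2.2, best)

-- B's helper `longest(pred)`
def pvLongest (answerKey : String) (k : Int) (pred : Char → Bool) : Int :=
  ((PySem.List.enumerate answerKey.toList 0).foldl
    (pvStepB answerKey.toList k pred) (0, 0, 0)).2.2

def maxConsecutiveAnswers_MK2_alt (answerKey : String) (k : Int) : Int :=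
  max (pvLongest answerKey k (fun c => c == 'T'))
      (pvLongest answerKey k (fun c => c != 'T'))

-- ===== PRECONDITION & SPEC =====
def Spec_maxConsecutiveAnswers_MK2 (answerKey : String) (k : Int) (out : Int) : Prop := out = maxConsecutiveAnswers_MK2_alt answerKey k
instance (answerKey : String) (k : Int) (out : Int) : Decidable (Spec_maxConsecutiveAnswers_MK2 answerKey k out) := by unfold Spec_maxConsecutiveAnswers_MK2; infer_instance

-- ===== CLAIM (what is proved, stated in full; the proofs are below) =====
def Claim_equal_maxConsecutiveAnswers_MK2 : Prop := ∀ (answerKey : String) (k : Int), Dom_maxConsecutiveAnswers_MK2 answerKey k → Spec_maxConsecutiveAnswers_MK2 answerKey k (maxConsecutiveAnswers_MK2 answerKey k)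

-- ===== LEMMAS AND PROOFS =====

-- pvG pred k p = length of the longest prefix of p holding at most k pred-characters
-- (p will be the REVERSED processed prefix, so prefixes of p = windows ending at the cursor).
def pvG (pred : Char → Bool) (k : Int) : List Char → Nat
  | [] => 0
  | c :: t =>
    if k < 0 then 0
    else if pred c then (if 1 ≤ k then pvG pred (k - 1) t + 1 else 0)
    else pvG pred k t + 1

-- largest A-valid (min(#T,#F) ≤ k) window ending at the cursor
def pvF (k : Int) (p : List Char) : Nat :=
  max (pvG (fun c => c == 'T') k p) (pvG (fun c => c != 'T') k p)

-- max of pvF over all prefixes still to come (rest = unprocessed, rp = reversed processed prefix)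
def pvAmax (k : Int) : List Char → List Char → Nat
  | [], _ => 0
  | c :: rest, rp => max (pvF k (c :: rp)) (pvAmax k rest (c :: rp))

-- max of pvG over all prefixes still to come
def pvBmax (pred : Char → Bool) (k : Int) : List Char → List Char → Nat
  | [], _ => 0
  | c :: rest, rp => max (pvG pred k (c :: rp)) (pvBmax pred k rest (c :: rp))

theorem pvG_le_length (pred : Char → Bool) (k : Int) (p : List Char) : pvG pred k p ≤ p.length := by
  induction p generalizing k with
  | nil => simp [pvG]
  | cons c t ih =>
    simp only [pvG, List.length_cons]
    split_ifs
    · omega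
    · have := ih (k := k - 1); omega
    · omega
    · have := ih (k := k); omega

theorem pvG_mono (pred : Char → Bool) {k k' : Int} (h : k ≤ k') (p : List Char) :
    pvG pred k p ≤ pvG pred k' p := by
  induction p generalizing k k' with
  | nil => simp [pvG]
  | cons c t ih =>
    simp only [pvG]
    split_ifs <;> first | omega | (simp; omega) | (have := ih (k := k-1) (k' := k'-1) (by omega); omega) | (have := ih h; omega)

theorem pvG_neg (pred : Char → Bool) {k : Int} (h : k < 0) (p : List Char) : pvG pred k p = 0 := by
  cases p <;> simp [pvG, h]

theorem pvG_char (pred : Char → Bool) (k : Int) (p : List Char) (m : Nat) (hm : m ≤ p.length) :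
    (((p.take m).countP pred : Int) ≤ k) ↔ (m ≤ pvG pred k p ∧ 0 ≤ k) := by
  induction p generalizing k m with
  | nil =>
    simp at hm
    subst hm
    simp [pvG]
  | cons c t ih =>
    cases m with
    | zero => simp [pvG]
    | succ m' =>
      simp only [List.take_succ_cons, List.countP_cons]
      by_cases hk : k < 0
      · constructor
        · intro h; push_cast at h; omega
        · rintro ⟨-, h0⟩; omega
      · push Not at hk
        by_cases hc : pred c
        · simp only [hc, if_pos, pvG, if_neg (by omega : ¬k < 0)]
          by_cases h1 : 1 ≤ k
          · rw [if_pos h1]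
            have := ih (k := k - 1) m' (by simp at hm; omega)
            push_cast at this ⊢
            constructor
            · intro h; have := this.mp (by omega); omega
            · intro h; have := this.mpr ⟨by omega, by omega⟩; omega
          · rw [if_neg h1]
            have hcnt : (0:Int) ≤ ((t.take m').countP pred : Int) := by positivity
            constructor
            · intro h; omega
            · intro h; omega
        · simp only [hc, pvG, if_neg (by omega : ¬k < 0)]
          have := ih (k := k) m' (by simp at hm; omega)
          push_cast at this ⊢
          constructor
          · intro h; have := this.mp (by omega); omega
          · intro h; have := this.mpr ⟨by omega, by omega⟩; omega

theorem pvG_cons_le (pred : Char → Bool) (k : Int) (c : Char) (p : List Char) :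
    pvG pred k (c :: p) ≤ pvG pred k p + 1 := by
  simp only [pvG]
  split_ifs with h1 h2 h3
  · omega
  · have := pvG_mono pred (by omega : k - 1 ≤ k) p; omega
  · omega
  · omega

theorem pvF_cons_le (k : Int) (c : Char) (p : List Char) : pvF k (c :: p) ≤ pvF k p + 1 := by
  have h1 := pvG_cons_le (fun c => c == 'T') k c p
  have h2 := pvG_cons_le (fun c => c != 'T') k c p
  simp only [pvF]; omega

theorem pvF_neg {k : Int} (h : k < 0) (p : List Char) : pvF k p = 0 := by
  simp [pvF, pvG_neg _ h]

theorem pvAmax_eq (k : Int) (rest rp : List Char) :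
    pvAmax k rest rp =
      max (pvBmax (fun c => c == 'T') k rest rp) (pvBmax (fun c => c != 'T') k rest rp) := by
  induction rest generalizing rp with
  | nil => simp [pvAmax, pvBmax]
  | cons c t ih => simp only [pvAmax, pvBmax, pvF, ih]; omega

theorem pvCountP_not (pred : Char → Bool) (p : List Char) :
    p.countP pred + p.countP (fun c => !pred c) = p.length := by
  induction p with
  | nil => rfl
  | cons c t ih => by_cases h : pred c <;> simp [h] <;> omega

theorem pvCountP_take_succ (pred : Char → Bool) (p : List Char) (m : Nat) (h : m < p.length) :
    (p.take (m + 1)).countP pred = (p.take m).countP pred + (if pred p[m] then 1 else 0) := by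
  rw [List.take_succ, List.getElem?_eq_getElem h, List.countP_append]
  simp only [Option.toList_some, List.countP_cons, List.countP_nil]
  by_cases hp : pred p[m] <;> simp [hp]

-- the character Python reads at s[len(rp)-m] when s = reverse(rp) ++ rest and 1 ≤ m ≤ len(rp)
theorem pvGet_window (rp rest : List Char) (m : Nat) (h1 : 1 ≤ m) (hm : m ≤ rp.length) :
    PySem.List.pyGet? (rp.reverse ++ rest) ((rp.length : Int) - (m : Int))
      = some (rp[m - 1]'(by omega)) := by
  have hj : ((rp.length : Int) - (m : Int)) = ((rp.length - m : Nat) : Int) := by omega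
  rw [hj, PySem.List.pyGet?_natCast]
  rw [List.getElem?_append_left (by (try rw [List.length_reverse]); omega)]
  rw [List.getElem?_reverse (by (try rw [List.length_reverse]); omega)]
  rw [show rp.length - 1 - (rp.length - m) = m - 1 from by omega]
  exact List.getElem?_eq_getElem (by omega)

-- the inner while loop contracts the window from size m to size min m (pvG pred k rp)
theorem pvShrink_spec (k : Int) (pred : Char → Bool) (rp rest : List Char) :
    ∀ (m : Nat), m ≤ rp.length →
    pvShrink (rp.reverse ++ rest) k pred ((rp.length : Int) - 1)
      (((rp.take m).countP pred : Int)) ((rp.length : Int) - (m : Int))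
    = (((rp.take (min m (pvG pred k rp))).countP pred : Int),
       (rp.length : Int) - ((min m (pvG pred k rp) : Nat) : Int)) := by
  intro m
  induction m with
  | zero =>
    intro hm
    rw [pvShrink, dif_neg (by omega)]
    simp
  | succ m' ih =>
    intro hm
    by_cases hk : k < ((rp.take (m' + 1)).countP pred : Int)
    · rw [pvShrink, dif_pos ⟨hk, by push_cast; omega⟩]
      have hget := pvGet_window rp rest (m' + 1) (by omega) hm
      rw [hget]
      have hcnt := pvCountP_take_succ pred rp m' (by omega)
      have harg1 : (if pred ((some (rp[m' + 1 - 1]'(by omega))).getD ' ') then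
            ((rp.take (m' + 1)).countP pred : Int) - 1 else ((rp.take (m' + 1)).countP pred : Int))
          = ((rp.take m').countP pred : Int) := by
        simp only [Option.getD_some]
        by_cases hp : pred (rp[m']'(by omega))
        · simp only [show (m' + 1 - 1) = m' from rfl, hp, if_pos]
          rw [hcnt]; simp [hp]
        · simp only [show (m' + 1 - 1) = m' from rfl, hp]
          rw [hcnt]; simp [hp]
      have harg2 : ((rp.length : Int) - ((m' + 1 : Nat) : Int)) + 1 = (rp.length : Int) - (m' : Int) := by
        push_cast; ring
      rw [harg1, harg2, ih (by omega)]
      have hg : pvG pred k rp ≤ m' := by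
        by_cases hk0 : k < 0
        · rw [pvG_neg pred hk0]; omega
        · by_contra hgt
          exact absurd ((pvG_char pred k rp (m' + 1) hm).mpr ⟨by omega, by omega⟩) (by omega)
      rw [show min (m' + 1) (pvG pred k rp) = min m' (pvG pred k rp) by omega]
    · rw [pvShrink, dif_neg (by push Not; intro h; omega)]
      have := (pvG_char pred k rp (m' + 1) hm).mp (by omega)
      rw [show min (m' + 1) (pvG pred k rp) = m' + 1 by omega]

-- one pass of B: the helper loop returns the running max of pvG over all prefixes
theorem pvB_loop (k : Int) (pred : Char → Bool) :
    ∀ (rest rp : List Char) (b : Nat),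
    ((PySem.List.enumerate rest (rp.length : Int)).foldl (pvStepB (rp.reverse ++ rest) k pred)
      (((rp.take (pvG pred k rp)).countP pred : Int),
       (rp.length : Int) - ((pvG pred k rp : Nat) : Int), (b : Int))).2.2
    = ((max b (pvBmax pred k rest rp) : Nat) : Int) := by
  intro rest
  induction rest with
  | nil => intro rp b; simp [PySem.List.enumerate_nil, pvBmax]
  | cons c t ih =>
    intro rp b
    rw [PySem.List.enumerate_cons, List.foldl_cons]
    have hsapp : rp.reverse ++ c :: t = (c :: rp).reverse ++ t := by simp
    set g' := pvG pred k (c :: rp) with hg'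
    have hgle : g' ≤ pvG pred k rp + 1 := pvG_cons_le pred k c rp
    have hgl : pvG pred k rp ≤ rp.length := pvG_le_length pred k rp
    have hstep :
        pvStepB (rp.reverse ++ c :: t) k pred
          (((rp.take (pvG pred k rp)).countP pred : Int),
           (rp.length : Int) - ((pvG pred k rp : Nat) : Int), (b : Int)) ((rp.length : Int), c)
        = ((((c :: rp).take g').countP pred : Int),
           ((c :: rp).length : Int) - (g' : Int), ((max b g' : Nat) : Int)) := by
      simp only [pvStepB]
      have hc1 : (if pred c then ((rp.take (pvG pred k rp)).countP pred : Int) + 1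
            else ((rp.take (pvG pred k rp)).countP pred : Int))
          = (((c :: rp).take (pvG pred k rp + 1)).countP pred : Int) := by
        rw [List.take_succ_cons, List.countP_cons]
        by_cases hp : pred c <;> simp [hp]
      rw [hc1]
      have hr : (rp.length : Int) = (((c :: rp).length : Nat) : Int) - 1 := by
        simp only [List.length_cons]; push_cast; ring
      rw [hsapp, hr]
      rw [show (((c :: rp).length : Nat) : Int) - 1 - ((pvG pred k rp : Nat) : Int)
            = (((c :: rp).length : Nat) : Int) - (((pvG pred k rp + 1 : Nat)) : Int) from by
          push_cast; ring]
      rw [pvShrink_spec k pred (c :: rp) t (pvG pred k rp + 1)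
            (by simp only [List.length_cons]; omega)]
      rw [show min (pvG pred k rp + 1) (pvG pred k (c :: rp)) = g' by omega]
      have hbest : (if (b : Int) < (((c :: rp).length : Nat) : Int) - 1 -
              ((((c :: rp).length : Nat) : Int) - (g' : Int)) + 1 then
            (((c :: rp).length : Nat) : Int) - 1 - ((((c :: rp).length : Nat) : Int) - (g' : Int)) + 1
            else (b : Int)) = ((max b g' : Nat) : Int) := by
        by_cases hbg : b < g'
        · rw [if_pos (by push_cast; omega)]; push_cast; omega
        · rw [if_neg (by push_cast; omega)]; push_cast; omega
      rw [hbest]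
    rw [hstep, hsapp]
    have hlen : ((rp.length : Int) + 1) = (((c :: rp).length : Nat) : Int) := by
      simp only [List.length_cons]; push_cast; ring
    rw [hlen, ih (c :: rp) (max b g')]
    simp only [pvBmax, ← hg']
    congr 1
    omega

-- the 'T'-count of A's counters determines both counters; A's condition is the pvF bound
theorem pvA_cond (k : Int) (rp' : List Char) (m : Nat) (hm : m + 1 ≤ rp'.length) :
    (min (((rp'.take (m + 1)).countP (fun c => c == 'T') : Int))
         (((m : Int) + 1) - ((rp'.take (m + 1)).countP (fun c => c == 'T') : Int)) ≤ k)
    ↔ (m + 1 ≤ pvF k rp' ∧ 0 ≤ k) := by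
  have hlen : (rp'.take (m + 1)).length = m + 1 := by simp; omega
  have hsum := pvCountP_not (fun c => c == 'T') (rp'.take (m + 1))
  have hbne : (rp'.take (m + 1)).countP (fun c => c != 'T')
      = (rp'.take (m + 1)).countP (fun c => !(c == 'T')) := rfl
  have hT := pvG_char (fun c => c == 'T') k rp' (m + 1) hm
  have hN := pvG_char (fun c => c != 'T') k rp' (m + 1) hm
  rw [hbne] at hN
  rw [min_le_iff]
  unfold pvF
  constructor
  · rintro (h | h)
    · have h2 := hT.mp h; exact ⟨le_max_iff.mpr (Or.inl h2.1), h2.2⟩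
    · have h2 := hN.mp (by omega); exact ⟨le_max_iff.mpr (Or.inr h2.1), h2.2⟩
  · rintro ⟨hmx, h0⟩
    rcases le_max_iff.mp hmx with h | h
    · exact Or.inl (hT.mpr ⟨h, h0⟩)
    · have := hN.mpr ⟨h, h0⟩; omega

-- A's fused loop returns the running max of pvF over all prefixes
theorem pvA_loop (k : Int) :
    ∀ (rest rp : List Char) (m : Nat), m ≤ rp.length → pvF k rp ≤ m →
    ((PySem.List.pyRange (rp.length : Int) ((rp.length : Int) + (rest.length : Int)) 1).foldl
      (pvStepA (rp.reverse ++ rest) k)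
      (((rp.take m).countP (fun c => c == 'T') : Int),
       (m : Int) - ((rp.take m).countP (fun c => c == 'T') : Int), (m : Int))).2.2
    = ((max m (pvAmax k rest rp) : Nat) : Int) := by
  intro rest
  induction rest with
  | nil =>
    intro rp m hm hF
    rw [show ((rp.length : Int) + (([] : List Char).length : Int)) = (rp.length : Int) by simp,
        PySem.List.pyRange_one_eq_nil le_rfl]
    simp [pvAmax]
  | cons c t ih =>
    intro rp m hm hF
    rw [PySem.List.pyRange_one_cons (by simp only [List.length_cons]; push_cast; omega), List.foldl_cons]
    set rp' := c :: rp with hrp'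
    have hsapp : rp.reverse ++ c :: t = rp'.reverse ++ t := by simp [hrp']
    set cT := ((rp.take m).countP (fun c => c == 'T') : Int) with hcT
    have hget0 : PySem.List.pyGet? (rp.reverse ++ c :: t) (rp.length : Int) = some c := by
      have := PySem.List.pyGet?_append_length rp.reverse t c
      simpa using this
    have hc1 : (if c == 'T' then cT + 1 else cT)
        = ((rp'.take (m + 1)).countP (fun x => x == 'T') : Int) := by
      rw [hrp', List.take_succ_cons, List.countP_cons]
      by_cases hp : c == 'T' <;> simp [hp, hcT]
    by_cases hcond :
        min (((rp'.take (m + 1)).countP (fun x => x == 'T') : Int))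
          (((m : Int) + 1) - ((rp'.take (m + 1)).countP (fun x => x == 'T') : Int)) ≤ k
    · -- window grows
      have hval := (pvA_cond k rp' m (by simp only [hrp', List.length_cons]; omega)).mp hcond
      have hstep : pvStepA (rp.reverse ++ c :: t) k (cT, (m : Int) - cT, (m : Int)) ((rp.length : Int))
          = (((rp'.take (m + 1)).countP (fun x => x == 'T') : Int),
             ((m + 1 : Nat) : Int) - ((rp'.take (m + 1)).countP (fun x => x == 'T') : Int),
             ((m + 1 : Nat) : Int)) := by
        simp only [pvStepA, hget0, Option.getD_some]
        rw [hc1]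
        have hfeq : (if c == 'T' then (m : Int) - cT else (m : Int) - cT + 1)
            = ((m : Int) + 1) - ((rp'.take (m + 1)).countP (fun x => x == 'T') : Int) := by
          rw [← hc1]; by_cases hp : c == 'T' <;> simp [hp] <;> push_cast <;> ring
        rw [hfeq, if_pos hcond]
        rw [show ((m : Int) + 1) = ((m + 1 : Nat) : Int) from by omega]
      rw [hstep]
      have hlen1 : ((rp.length : Int) + 1) = ((rp'.length : Nat) : Int) := by
        simp only [hrp', List.length_cons]; push_cast; ring
      have hlen2 : ((rp.length : Int) + ((c :: t).length : Int))
          = ((rp'.length : Nat) : Int) + ((t.length : Nat) : Int) := by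
        simp only [hrp', List.length_cons]; push_cast; ring
      rw [hsapp, hlen1, hlen2, ih rp' (m + 1) (by simp only [hrp', List.length_cons]; omega)
            (le_trans (pvF_cons_le k c rp) (by omega))]
      have hFrp' : pvF k rp' = m + 1 :=
        le_antisymm (le_trans (pvF_cons_le k c rp) (by omega)) hval.1
      simp only [pvAmax, ← hrp', hFrp']
      congr 1
      omega
    · -- window slides
      have hval : pvF k rp' ≤ m := by
        by_cases hk0 : k < 0
        · rw [pvF_neg hk0]; omega
        · by_contra hgt
          exact hcond ((pvA_cond k rp' m (by simp only [hrp', List.length_cons]; omega)).mpr ⟨by omega, by omega⟩)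
      have hstep : pvStepA (rp.reverse ++ c :: t) k (cT, (m : Int) - cT, (m : Int)) ((rp.length : Int))
          = (((rp'.take m).countP (fun x => x == 'T') : Int),
             ((m : Nat) : Int) - ((rp'.take m).countP (fun x => x == 'T') : Int),
             ((m : Nat) : Int)) := by
        simp only [pvStepA, hget0, Option.getD_some]
        rw [hc1]
        have hfeq : (if c == 'T' then (m : Int) - cT else (m : Int) - cT + 1)
            = ((m : Int) + 1) - ((rp'.take (m + 1)).countP (fun x => x == 'T') : Int) := by
          rw [← hc1]; by_cases hp : c == 'T' <;> simp [hp] <;> push_cast <;> ring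
        rw [hfeq, if_neg hcond]
        cases Nat.eq_zero_or_pos m with
        | inl hm0 =>
          subst hm0
          rw [show ((rp.length : Int) - ((0 : Nat) : Int)) = ((rp.length : Int)) from by
                push_cast; ring, hget0]
          by_cases hp : c == 'T' <;>
            simp [hp, hrp', Prod.mk.injEq]
        | inr hm1 =>
          have hget2 := pvGet_window rp (c :: t) m hm1 hm
          rw [hget2]
          simp only [Option.getD_some]
          have hA : (rp'.take (m + 1)).countP (fun x => x == 'T')
              = (rp.take m).countP (fun x => x == 'T') + (if c == 'T' then 1 else 0) := by
            rw [hrp', List.take_succ_cons, List.countP_cons]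
          have hB : (rp.take m).countP (fun x => x == 'T')
              = (rp.take (m - 1)).countP (fun x => x == 'T')
                + (if (rp[m - 1]'(by omega)) == 'T' then 1 else 0) := by
            have hs := pvCountP_take_succ (fun x => x == 'T') rp (m - 1) (by omega)
            rw [show m - 1 + 1 = m from by omega] at hs
            exact hs
          have hC : (rp'.take m).countP (fun x => x == 'T')
              = (rp.take (m - 1)).countP (fun x => x == 'T') + (if c == 'T' then 1 else 0) := by
            conv_lhs => rw [show m = (m - 1) + 1 from by omega]
            rw [hrp', List.take_succ_cons, List.countP_cons]
          by_cases hq : (rp[m - 1]'(by omega)) == 'T' <;> by_cases hp : c == 'T' <;>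
            simp only [hq, hp, if_true, if_false, Bool.false_eq_true, if_pos, hcT] at hA hB hC ⊢ <;>
            simp [Prod.mk.injEq, hA, hB, hC] <;> omega
      rw [hstep]
      have hlen1 : ((rp.length : Int) + 1) = ((rp'.length : Nat) : Int) := by
        simp only [hrp', List.length_cons]; push_cast; ring
      have hlen2 : ((rp.length : Int) + ((c :: t).length : Int))
          = ((rp'.length : Nat) : Int) + ((t.length : Nat) : Int) := by
        simp only [hrp', List.length_cons]; push_cast; ring
      rw [hsapp, hlen1, hlen2, ih rp' m (by simp only [hrp', List.length_cons]; omega) hval]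
      simp only [pvAmax, ← hrp']
      congr 1
      omega

theorem pvLongest_eq (s : String) (k : Int) (pred : Char → Bool) :
    pvLongest s k pred = ((pvBmax pred k s.toList [] : Nat) : Int) := by
  have h := pvB_loop k pred s.toList [] 0
  simp only [List.length_nil, Nat.cast_zero, List.reverse_nil, List.nil_append,
    List.take_nil, pvG, List.countP_nil, Nat.cast_zero, Int.sub_zero, Nat.max_eq_right (Nat.zero_le _)] at h
  simpa [pvLongest] using h

-- ===== VERDICT (by name: the statement is the Claim_ definition above) =====
theorem maxConsecutiveAnswers_MK2_spec : Claim_equal_maxConsecutiveAnswers_MK2 := by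
  intro s k _
  unfold Spec_maxConsecutiveAnswers_MK2 maxConsecutiveAnswers_MK2 maxConsecutiveAnswers_MK2_alt
  have hA := pvA_loop k s.toList [] 0 (by simp) (by simp [pvF, pvG])
  simp only [List.length_nil, Nat.cast_zero, List.reverse_nil, List.nil_append, List.take_nil,
    List.countP_nil, Int.zero_add, Int.sub_zero, Nat.zero_max] at hA
  rw [show PySem.Str.len s = ((s.toList.length : Nat) : Int) from PySem.Str.len_eq s] at *
  rw [show ((0:Int), (0:Int), (0:Int)) = (((0:Nat) : Int), (0:Int) - ((0:Nat):Int), ((0:Nat):Int)) by norm_num] at *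
  rw [hA, pvLongest_eq, pvLongest_eq, pvAmax_eq]
  push_cast [Nat.cast_max]
  rfl
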